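-- pv_equiv track=rewrite | github.com/vhunany/comp110ideas | units-f24/unit03/remove_based_on_list.py | remove_values_from_dict
-- ===== SOURCE A (Python) =====
-- def remove_values_from_dict(input_dict, values_to_remove):
--     # Convert list of values to remove into a list (not using set)
--     values_list = values_to_remove
--     removed_count = 0
--
--     # Collect keys to remove
--     keys_to_remove = []
--     for key in input_dict:
--         if input_dict[key] in values_list:
--             keys_to_remove.append(key)
--
--     # Remove keys from the dictionary
--     for key in keys_to_remove:
--         if input_dict[key] in values_list:
--             input_dict.pop(key)  # Remove the key-value pair from the dictionary
--             removed_count += 1  # Increment the removed count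
--
--     return removed_count
-- ===== SOURCE B (Python) =====
-- def remove_values_from_dict(input_dict, values_to_remove):
--     # Build the surviving entries once; removed count = size difference.
--     kept = {k: v for k, v in input_dict.items() if v not in values_to_remove}
--     removed = len(input_dict) - len(kept)
--     # Perform the same in-place mutation as the original (clear + re-insert survivors).
--     input_dict.clear()
--     input_dict.update(kept)
--     return removed
-- ===== Notes on version B (the rewrite author's own statement) =====
-- stated objective: simpler
-- what changed: Instead of collecting keys to remove and popping them one by one in a second pass over a mutating dict, B builds the dict of survivors with a single comprehension and returns the size difference, then restores it in place with clear()+update().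
import Mathlib
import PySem

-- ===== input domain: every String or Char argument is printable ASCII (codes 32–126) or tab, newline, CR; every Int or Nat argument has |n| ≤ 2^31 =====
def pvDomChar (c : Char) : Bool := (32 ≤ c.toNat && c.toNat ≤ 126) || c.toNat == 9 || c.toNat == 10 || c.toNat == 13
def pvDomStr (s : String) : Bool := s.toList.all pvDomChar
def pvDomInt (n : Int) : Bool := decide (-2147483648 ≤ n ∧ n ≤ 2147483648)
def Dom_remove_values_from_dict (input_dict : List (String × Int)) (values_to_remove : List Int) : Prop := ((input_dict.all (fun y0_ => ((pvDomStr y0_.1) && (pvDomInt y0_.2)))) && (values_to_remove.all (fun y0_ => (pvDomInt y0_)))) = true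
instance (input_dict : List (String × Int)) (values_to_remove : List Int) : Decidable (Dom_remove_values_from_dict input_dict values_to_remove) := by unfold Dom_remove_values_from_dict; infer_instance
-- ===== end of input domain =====

-- B replaces A's two-pass collect-keys-then-pop loop by a single survivor comprehension plus a
-- size difference (objective: simpler). Both mutate the dict the same way in Python; the
-- equivalence proved here is about the RETURN value.

-- ===== PORT A =====
-- A: collect keys whose value is in the list, then pop them one by one, counting.
def remove_values_from_dict (input_dict : List (String × Int)) (values_to_remove : List Int) : Int :=
  let d := PySem.Dict.ofList input_dict
  let keys_to_remove : List String :=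
    d.keys.foldl (fun acc key =>
      match d.get? key with
      | some v => if values_to_remove.contains v then acc ++ [key] else acc
      | none => acc) []        -- none unreachable: key is iterated from d itself
  let st := keys_to_remove.foldl (fun (st : PySem.Dict String Int × Int) key =>
      match st.1.get? key with
      | some v => if values_to_remove.contains v then (st.1.erase key, st.2 + 1) else st
      | none => st) (d, 0)     -- none unreachable: each distinct key is popped at most once
  st.2

-- ===== PORT B =====
-- B: dict comprehension of survivors; answer is the size difference.
def remove_values_from_dict_alt (input_dict : List (String × Int)) (values_to_remove : List Int) : Int :=
  let d := PySem.Dict.ofList input_dict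
  let kept := PySem.Dict.ofList (d.items.filter (fun kv => !values_to_remove.contains kv.2))
  (d.size : Int) - (kept.size : Int)

-- ===== PRECONDITION & SPEC =====
def Spec_remove_values_from_dict (input_dict : List (String × Int)) (values_to_remove : List Int) (out : Int) : Prop := out = remove_values_from_dict_alt input_dict values_to_remove
instance (input_dict : List (String × Int)) (values_to_remove : List Int) (out : Int) : Decidable (Spec_remove_values_from_dict input_dict values_to_remove out) := by unfold Spec_remove_values_from_dict; infer_instance

-- ===== CLAIM (what is proved, stated in full; the proofs are below) =====
def Claim_equal_remove_values_from_dict : Prop := ∀ (input_dict : List (String × Int)) (values_to_remove : List Int), Dom_remove_values_from_dict input_dict values_to_remove → Spec_remove_values_from_dict input_dict values_to_remove (remove_values_from_dict input_dict values_to_remove)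

-- ===== LEMMAS AND PROOFS =====

-- ofList of a list with distinct keys keeps the items verbatim.
theorem items_ofList_of_nodup {ν : Type} (l : List (String × ν))
    (h : (l.map Prod.fst).Nodup) : (PySem.Dict.ofList l).items = l := by
  have := PySem.Dict.items_foldl_insert_fresh (κ := String) (ν := ν)
    l Prod.fst Prod.snd PySem.Dict.empty (by intro a _; rfl) h
  simpa [PySem.Dict.ofList, PySem.Dict.update, PySem.Dict.empty] using this

-- erasing one key does not change lookups at other keys
theorem get?_erase_of_ne {ν : Type} (d : PySem.Dict String ν) (k k' : String)
    (h : k' ≠ k) : (d.erase k).get? k' = d.get? k' := by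
  rcases d with ⟨items⟩
  simp only [PySem.Dict.erase, PySem.Dict.get?]
  induction items with
  | nil => rfl
  | cons q rest ih =>
    by_cases hq : q.1 = k
    · rw [List.filter_cons_of_neg (by simp [hq]),
        List.find?_cons_of_neg (by simp [hq]; exact fun h' => h (h' ▸ hq ▸ rfl))]
      exact ih
    · rw [List.filter_cons_of_pos (by simp [hq])]
      by_cases hq' : q.1 = k'
      · rw [List.find?_cons_of_pos (by simp [hq']), List.find?_cons_of_pos (by simp [hq'])]
      · rw [List.find?_cons_of_neg (by simp [hq']), List.find?_cons_of_neg (by simp [hq'])]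
        exact ih

-- the pop loop of A: over distinct keys that are all present with a value in the list,
-- it counts exactly the length of the key list
theorem popLoop_count (vs : List Int) :
    ∀ (ks : List String) (d : PySem.Dict String Int) (c : Int),
    ks.Nodup →
    (∀ k ∈ ks, ∃ v, d.get? k = some v ∧ vs.contains v = true) →
    (ks.foldl (fun (st : PySem.Dict String Int × Int) key =>
      match st.1.get? key with
      | some v => if vs.contains v then (st.1.erase key, st.2 + 1) else st
      | none => st) (d, c)).2 = c + ks.length := by
  intro ks
  induction ks with
  | nil => intro d c _ _; simp
  | cons k ks ih =>
    intro d c hnd hall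
    obtain ⟨v, hv, hvin⟩ := hall k (List.mem_cons_self)
    have hnd' := (List.nodup_cons.mp hnd).2
    have hk := (List.nodup_cons.mp hnd).1
    simp only [List.foldl_cons, hv, hvin, if_pos]
    have : (ks.foldl (fun (st : PySem.Dict String Int × Int) key =>
      match st.1.get? key with
      | some v => if vs.contains v then (st.1.erase key, st.2 + 1) else st
      | none => st) (d.erase k, c + 1)).2 = (c + 1) + ks.length := by
      apply ih _ _ hnd'
      intro k' hk'
      obtain ⟨v', hv', hvin'⟩ := hall k' (List.mem_cons_of_mem _ hk')
      exact ⟨v', by rw [get?_erase_of_ne _ _ _ (by rintro rfl; exact hk hk')]; exact hv', hvin'⟩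
    rw [this]; simp [List.length_cons]; push_cast; ring

theorem length_filter_not_aux {α : Type} (p : α → Bool) (l : List α) :
    (l.filter p).length + (l.filter (fun a => !p a)).length = l.length := by
  induction l with
  | nil => rfl
  | cons a l ih =>
    by_cases h : p a <;> simp [h] <;> omega

-- ===== VERDICT (by name: the statement is the Claim_ definition above) =====
theorem remove_values_from_dict_spec : Claim_equal_remove_values_from_dict := by
  intro input_dict vs _
  unfold Spec_remove_values_from_dict remove_values_from_dict remove_values_from_dict_alt
  dsimp only
  set d := PySem.Dict.ofList input_dict with hd
  have hnd : d.keys.Nodup := PySem.Dict.nodup_keys_ofList input_dict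
  have hkeys : d.keys = d.items.map Prod.fst := rfl
  set p : String × Int → Bool := fun kv => vs.contains kv.2 with hp
  -- first loop yields the keys of the entries whose value is in vs
  have h1 : (d.keys.foldl (fun acc key =>
      match d.get? key with
      | some v => if vs.contains v then acc ++ [key] else acc
      | none => acc) []) = (d.items.filter p).map Prod.fst := by
    rw [hkeys, List.foldl_map]
    have := PySem.List.foldl_congr_mem d.items
      (fun acc kv => match d.get? kv.1 with
        | some v => if vs.contains v then acc ++ [kv.1] else acc
        | none => acc)
      (fun acc kv => if p kv then acc ++ [kv.1] else acc) ([] : List String)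
      (by intro acc kv hkv
          have : d.get? kv.1 = some kv.2 := PySem.Dict.get?_of_mem_items d hkv hnd
          simp [this, hp])
    rw [this, PySem.List.foldl_append_if p Prod.fst d.items []]
    simp
  rw [h1]
  -- second loop counts the length of that key list
  have hndk : ((d.items.filter p).map Prod.fst).Nodup := by
    rw [hkeys] at hnd
    exact hnd.sublist (List.Sublist.map Prod.fst List.filter_sublist)
  have h2 := popLoop_count vs ((d.items.filter p).map Prod.fst) d 0 hndk
    (by intro k hk
        obtain ⟨kv, hkvmem, rfl⟩ := List.mem_map.mp hk
        have hmem := List.mem_of_mem_filter hkvmem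
        have hpkv : p kv = true := List.of_mem_filter hkvmem
        exact ⟨kv.2, PySem.Dict.get?_of_mem_items d hmem hnd, hpkv⟩)
  rw [h2]
  -- B's size difference equals the number of filtered-out entries
  have hkept : (PySem.Dict.ofList (d.items.filter (fun kv => !vs.contains kv.2))).items
      = d.items.filter (fun kv => !vs.contains kv.2) := by
    apply items_ofList_of_nodup
    rw [hkeys] at hnd
    exact hnd.sublist (List.Sublist.map Prod.fst List.filter_sublist)
  simp only [PySem.Dict.size, hkept, List.length_map]
  have := length_filter_not_aux p d.items
  simp only [hp] at this ⊢
  omega
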